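-- pv_equiv track=rewrite | github.com/MiuLab/CUDA-DST | cuda/utility/slot_value_ctrl.py | check_multi_recommend
-- ===== SOURCE A (Python) =====
-- def check_multi_recommend(recommends):
--         for labels in recommends.values():
--             exist = []
--             for slot_value in labels:
--                 if slot_value[0] in exist:
--                     return True
--                 else:
--                     exist.append(slot_value[0])
--         return False
-- ===== SOURCE B (Python) =====
-- def check_multi_recommend(recommends):
--     for labels in recommends.values():
--         keys = [sv[0] for sv in labels]
--         if len(keys) != len(set(keys)):
--             return True
--     return False
-- ===== Notes on version B (the rewrite author's own statement) =====
-- stated objective: simpler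
-- what changed: Replaces the incremental seen-list with its O(k^2) membership scan per element by building the group's key list once and comparing its length with the cardinality of its set.
-- outside the precondition, e.g. on check_multi_recommend({'x': [['a'], ['a'], []]}): A returns True, B raises IndexError
import Mathlib
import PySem

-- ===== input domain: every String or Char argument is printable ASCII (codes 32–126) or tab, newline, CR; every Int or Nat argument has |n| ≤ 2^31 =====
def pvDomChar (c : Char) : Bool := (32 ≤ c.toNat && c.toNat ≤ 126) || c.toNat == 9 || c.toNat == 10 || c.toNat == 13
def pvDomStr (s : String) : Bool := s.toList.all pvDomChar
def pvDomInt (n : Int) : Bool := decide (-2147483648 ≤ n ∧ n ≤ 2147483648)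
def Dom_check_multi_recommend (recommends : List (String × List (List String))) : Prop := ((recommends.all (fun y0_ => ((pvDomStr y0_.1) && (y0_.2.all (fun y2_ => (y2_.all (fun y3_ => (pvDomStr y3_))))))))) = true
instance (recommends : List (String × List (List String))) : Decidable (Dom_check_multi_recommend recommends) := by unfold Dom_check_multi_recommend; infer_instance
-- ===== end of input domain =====

-- B replaces A's incremental seen-list (inner membership scan per element) by building each
-- group's key list once and comparing its length with the size of its set: simpler, one pass.

-- ===== PORT A =====
-- inner loop of A over one group's labels, carrying the growing `exist` list;
-- slot_value[0] is PySem.List.pyGetD sv 0 "" — exact under Pre_ (nonempty inner lists; Python raises IndexError on []).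
def cmrInner (labels : List (List String)) (exist : List String) : Bool :=
  match labels with
  | [] => false
  | sv :: rest =>
      let k := PySem.List.pyGetD sv 0 ""
      if exist.contains k then true else cmrInner rest (exist ++ [k])

def check_multi_recommend (recommends : List (String × List (List String))) : Bool :=
  match recommends with
  | [] => false
  | g :: rest => if cmrInner g.2 [] then true else check_multi_recommend rest

-- ===== PORT B =====
-- len(keys) != len(set(keys)); sv[0] again as pyGetD sv 0 "" (exact under Pre_).
def check_multi_recommend_alt (recommends : List (String × List (List String))) : Bool :=
  recommends.any (fun g =>
    let keys := g.2.map (fun sv => PySem.List.pyGetD sv 0 "")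
    decide (keys.length ≠ (PySem.Set.ofList keys).length))

-- ===== PRECONDITION & SPEC =====
-- Pre_ excludes inputs containing an empty slot-value list, on which sv[0] raises IndexError
-- (A can still short-circuit to True when a duplicate precedes the empty element; B's full
-- comprehension raises there, so those inputs are excluded).
def Pre_check_multi_recommend (recommends : List (String × List (List String))) : Prop :=
  ∀ g ∈ recommends, ∀ sv ∈ g.2, sv ≠ []
instance (recommends : List (String × List (List String))) : Decidable (Pre_check_multi_recommend recommends) := by unfold Pre_check_multi_recommend; infer_instance

def pvWitness_check_multi_recommend : (List (String × List (List String))) := [("x", [["a"], ["b"]])]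

def Spec_check_multi_recommend (recommends : List (String × List (List String))) (out : Bool) : Prop := out = check_multi_recommend_alt recommends
instance (recommends : List (String × List (List String))) (out : Bool) : Decidable (Spec_check_multi_recommend recommends out) := by unfold Spec_check_multi_recommend; infer_instance

-- ===== CLAIM (what is proved, stated in full; the proofs are below) =====
def Claim_equal_check_multi_recommend : Prop := ∀ (recommends : List (String × List (List String))), Dom_check_multi_recommend recommends → Pre_check_multi_recommend recommends → Spec_check_multi_recommend recommends (check_multi_recommend recommends)

-- ===== LEMMAS AND PROOFS =====

-- A's inner loop, seen through the extracted keys: with a duplicate-free `exist`,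
-- it returns true exactly when `exist ++ keys` contains a repetition.
theorem cmrInner_eq_not_nodup (labels : List (List String)) (exist : List String)
    (h : exist.Nodup) :
    cmrInner labels exist = !decide ((exist ++ labels.map (fun sv => PySem.List.pyGetD sv 0 "")).Nodup) := by
  induction labels generalizing exist with
  | nil => simp [cmrInner, h]
  | cons sv rest ih =>
      by_cases hk : (PySem.List.pyGetD sv 0 "") ∈ exist
      · have hnn : ¬ (exist ++ PySem.List.pyGetD sv 0 "" :: rest.map (fun sv => PySem.List.pyGetD sv 0 "")).Nodup := by
          intro hn
          rcases List.nodup_append.mp hn with ⟨-, -, hd⟩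
          exact hd _ hk _ (by simp) rfl
        simp [cmrInner, List.contains_eq_mem, hk, hnn]
      · have hn : (exist ++ [PySem.List.pyGetD sv 0 ""]).Nodup := by
          rw [List.nodup_append]
          refine ⟨h, List.nodup_singleton _, ?_⟩
          intro a ha b hb
          rw [List.mem_singleton] at hb
          subst hb
          exact fun hab => hk (hab ▸ ha)
        rw [show cmrInner (sv :: rest) exist
              = cmrInner rest (exist ++ [PySem.List.pyGetD sv 0 ""]) by
            simp [cmrInner, List.contains_eq_mem, hk]]
        rw [ih _ hn]
        simp [List.append_assoc]

-- `set(keys)` has the same length as `keys` iff `keys` has no duplicates: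
-- PySem.Set.ofList keys is a duplicate-free sublist of keys.
theorem ofList_sublist (xs : List String) : (PySem.Set.ofList xs).Sublist xs := by
  induction xs using List.reverseRecOn with
  | nil => simp [PySem.Set.ofList_nil]
  | append_singleton ys y ih =>
      rw [PySem.Set.ofList_append_singleton, PySem.Set.add_eq_ite]
      split
      · exact ih.trans (List.sublist_append_left ys [y])
      · exact List.Sublist.append ih (List.Sublist.refl [y])

theorem length_ofList_eq_iff (xs : List String) :
    (PySem.Set.ofList xs).length = xs.length ↔ xs.Nodup := by
  constructor
  · intro h
    have he := (ofList_sublist xs).eq_of_length h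
    have hn : (PySem.Set.ofList xs).Nodup := PySem.Set.nodup_ofList xs
    rwa [he] at hn
  · intro h
    rw [PySem.Set.ofList_eq_self_of_nodup xs h]

-- per group, A's inner loop agrees with B's length comparison
theorem group_eq (labels : List (List String)) :
    cmrInner labels [] =
      decide ((labels.map (fun sv => PySem.List.pyGetD sv 0 "")).length
        ≠ (PySem.Set.ofList (labels.map (fun sv => PySem.List.pyGetD sv 0 ""))).length) := by
  rw [cmrInner_eq_not_nodup labels [] List.nodup_nil]
  simp only [List.nil_append, ← decide_not]
  refine decide_eq_decide.mpr ?_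
  rw [← length_ofList_eq_iff]
  omega

-- the two ports agree on every input (no hypotheses needed: the ports are total)
theorem ports_eq (recommends : List (String × List (List String))) :
    check_multi_recommend recommends = check_multi_recommend_alt recommends := by
  induction recommends with
  | nil => rfl
  | cons g rest ih =>
      simp only [check_multi_recommend, check_multi_recommend_alt, List.any_cons]
      rw [group_eq g.2, ih]
      simp only [check_multi_recommend_alt]
      simp

-- ===== VERDICT (by name: the statement is the Claim_ definition above) =====
theorem check_multi_recommend_spec : Claim_equal_check_multi_recommend := by
  intro recommends _ _
  exact ports_eq recommends
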